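-- pv_equiv track=rewrite | github.com/vinaycchndra/Python_LLDs | huffman_compression/huffman_encoder.py | encode_map_keys_value_pairs
-- ===== SOURCE A (Python) =====
-- from collections import deque
--
-- def encode_map_keys_value_pairs(decode_key: str, encoded_key: str):
--     section_que = deque()
--     decode_key = ord(decode_key)
--     encoded_key = list(encoded_key)
--     key_pad = key_pad = (8-len(encoded_key)%8)%8
--
--     # The first character of the section que will the asccii
--     # value of the decode key for example in decode_map
--     # {"a": "010110"}----> "a" is the decode key and the "010110" is the huffman code
--     section_que.append(decode_key)
--
--     # The second character is the padding count in the huffman code to make it multiple of the 8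
--     # the padding count is useful while decoding the individual character key and corresponding huffamn code
--     section_que.append(key_pad)
--
--     # padding the huffman code with the zeros
--     for _ in range(key_pad):
--         encoded_key.append('0')
--
--     # converting the huffman code with padding into combination of ascii values
--     temp_arr = []
--     for char in encoded_key:
--         temp_arr.append(char)
--
--         if len(temp_arr) == 8:
--             section_que.append(int("".join(temp_arr), 2))
--             temp_arr = []
--
--     # To know overall section length of the key and value pair along with the padding count byte, key byte, huffman code(with padding) bytes
--     section_que.appendleft(len(section_que)+1)
--     return list(section_que)
-- ===== SOURCE B (Python) =====
-- def encode_map_keys_value_pairs(decode_key: str, encoded_key: str):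
--     key_pad = (8 - len(encoded_key) % 8) % 8
--     num_bytes = (len(encoded_key) + key_pad) // 8
--     if encoded_key:
--         body = list((int(encoded_key, 2) << key_pad).to_bytes(num_bytes, 'big'))
--     else:
--         body = []
--     return [3 + num_bytes, ord(decode_key), key_pad] + body
-- ===== Notes on version B (the rewrite author's own statement) =====
-- stated objective: idiomatic
-- what changed: Replaces the deque plus per-character buffer-and-flush loop over 8-char chunks with one whole-string int(encoded_key,2) conversion, a left shift by the pad, and int.to_bytes(num_bytes,'big'), with the header computed arithmetically.
-- outside the precondition, e.g. on encode_map_keys_value_pairs('a', '+0000001+0000001'): A returns [5, 97, 0, 1, 1], B raises ValueError; on encode_map_keys_value_pairs('a', '\t\t00010  '): A returns [5, 97, 7, 2, 0], B returns [5, 97, 7, 1, 0]; on encode_map_keys_value_pairs('a', '-0000001'): A returns [4, 97, 0, -1], B raises OverflowError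
import Mathlib
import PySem

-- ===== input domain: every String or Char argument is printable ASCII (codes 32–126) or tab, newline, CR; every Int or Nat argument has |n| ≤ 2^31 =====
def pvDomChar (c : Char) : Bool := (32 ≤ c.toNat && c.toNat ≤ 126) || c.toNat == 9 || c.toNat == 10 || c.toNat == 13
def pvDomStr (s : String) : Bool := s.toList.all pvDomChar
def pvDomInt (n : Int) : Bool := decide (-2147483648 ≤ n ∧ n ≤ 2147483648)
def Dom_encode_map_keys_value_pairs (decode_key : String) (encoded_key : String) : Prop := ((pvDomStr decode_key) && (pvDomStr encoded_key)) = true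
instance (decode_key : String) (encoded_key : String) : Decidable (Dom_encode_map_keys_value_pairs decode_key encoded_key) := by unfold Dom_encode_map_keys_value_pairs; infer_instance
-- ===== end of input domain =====

-- B replaces A's deque and per-character 8-char buffer-and-flush loop with one whole-string
-- base-2 conversion, a shift by the pad, and a big-endian to_bytes; objective: idiomatic.

-- ===== PORT A =====

-- int(s, 2) for a string of '0'/'1' digits (exact on Pre_'s binary-digit domain)
def pvParseBin (l : List Char) : Nat :=
  l.foldl (fun acc c => acc * 2 + (if c = '1' then 1 else 0)) 0

-- the 'for char in encoded_key' loop: state = (section_que tail, temp_arr)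
def pvLoopA : List Char → List Int → List Char → List Int
  | [], sections, _ => sections
  | c :: rest, sections, temp =>
    let temp := temp ++ [c]
    if temp.length == 8 then
      pvLoopA rest (sections ++ [(pvParseBin temp : Int)]) []
    else
      pvLoopA rest sections temp

def encode_map_keys_value_pairs (decode_key : String) (encoded_key : String) : List Int :=
  -- ord(decode_key): Pre_ guarantees decode_key has exactly one char
  let dk : Int := ((decode_key.toList.headD ' ').toNat : Int)
  let ek : List Char := encoded_key.toList
  let key_pad : Int := PySem.Int.mod (8 - PySem.Int.mod (ek.length : Int) 8) 8
  -- for _ in range(key_pad): encoded_key.append('0')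
  let ek := (PySem.List.pyRange 0 key_pad 1).foldl (fun l _ => l ++ ['0']) ek
  let sections : List Int := [dk, key_pad]
  let sections := pvLoopA ek sections []
  ((sections.length : Int) + 1) :: sections

-- ===== PORT B =====

-- int(s, 2) as B calls it on the whole huffman string (exact on Pre_'s binary-digit domain)
def pvBinVal (l : List Char) : Nat :=
  l.foldl (fun acc c => acc * 2 + (if c = '1' then 1 else 0)) 0

-- (value).to_bytes(n, 'big') as a list of ints
def pvToBytesBE : Nat → Nat → List Int
  | 0, _ => []
  | n + 1, v => pvToBytesBE n (v / 256) ++ [((v % 256 : Nat) : Int)]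

def encode_map_keys_value_pairs_alt (decode_key : String) (encoded_key : String) : List Int :=
  let ek : List Char := encoded_key.toList
  let key_pad : Nat := (8 - ek.length % 8) % 8
  let num_bytes : Nat := (ek.length + key_pad) / 8
  let body : List Int :=
    if ek.isEmpty then [] else pvToBytesBE num_bytes (pvBinVal ek <<< key_pad)
  ((3 + num_bytes : Nat) : Int) :: ((decode_key.toList.headD ' ').toNat : Int) :: (key_pad : Nat) :: body

-- ===== PRECONDITION & SPEC =====
-- Pre_ admits a one-char decode_key (ord raises otherwise) and an encoded_key that is optional
-- leading whitespace and '+' (at most 7 junk chars) followed by '0'/'1' digits only; it excludes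
-- the remaining non-bit-string inputs (underscores, '-', junk past the first 8-char chunk,
-- trailing whitespace), where int(s,2) applied per 8-char chunk by A and to the whole string by B
-- raises on different inputs or yields accidental values (see claim cites).
def pvPreEK (ek : List Char) : Bool :=
  let rest := ek.dropWhile (fun c => c == ' ' || c == '\t' || c == '\n' || c == '\r')
  let rest := if rest.headD ' ' == '+' then rest.drop 1 else rest
  ek.isEmpty || ((ek.length - rest.length ≤ 7 : Bool) && !rest.isEmpty
    && rest.all (fun c => c == '0' || c == '1'))
def Pre_encode_map_keys_value_pairs (decode_key : String) (encoded_key : String) : Prop :=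
  decode_key.toList.length = 1 ∧ pvPreEK encoded_key.toList = true
instance (decode_key : String) (encoded_key : String) : Decidable (Pre_encode_map_keys_value_pairs decode_key encoded_key) := by unfold Pre_encode_map_keys_value_pairs; infer_instance

def pvWitness_encode_map_keys_value_pairs : String × String := ("a", "0101")

def Spec_encode_map_keys_value_pairs (decode_key : String) (encoded_key : String) (out : List Int) : Prop := out = encode_map_keys_value_pairs_alt decode_key encoded_key
instance (decode_key : String) (encoded_key : String) (out : List Int) : Decidable (Spec_encode_map_keys_value_pairs decode_key encoded_key out) := by unfold Spec_encode_map_keys_value_pairs; infer_instance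

-- ===== CLAIM (what is proved, stated in full; the proofs are below) =====
def Claim_equal_encode_map_keys_value_pairs : Prop := ∀ (decode_key : String) (encoded_key : String), Dom_encode_map_keys_value_pairs decode_key encoded_key → Pre_encode_map_keys_value_pairs decode_key encoded_key → Spec_encode_map_keys_value_pairs decode_key encoded_key (encode_map_keys_value_pairs decode_key encoded_key)

-- ===== LEMMAS AND PROOFS =====

theorem pvParseBin_aux (l : List Char) (acc : Nat) :
    l.foldl (fun acc c => acc * 2 + (if c = '1' then 1 else 0)) acc
      = acc * 2 ^ l.length + pvParseBin l := by
  induction l generalizing acc with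
  | nil => simp [pvParseBin]
  | cons c t ih =>
    simp only [pvParseBin, List.foldl_cons, List.length_cons]
    rw [ih, ih (0 * 2 + (if c = '1' then 1 else 0))]
    ring

theorem pvParseBin_append (xs ys : List Char) :
    pvParseBin (xs ++ ys) = pvParseBin xs * 2 ^ ys.length + pvParseBin ys := by
  unfold pvParseBin
  rw [List.foldl_append, pvParseBin_aux]
  rfl

theorem pvParseBin_lt (l : List Char) : pvParseBin l < 2 ^ l.length := by
  induction l using List.reverseRecOn with
  | nil => simp [pvParseBin]
  | append_singleton t c ih =>
    rw [pvParseBin_append]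
    have hc : (if c = '1' then (1:Nat) else 0) < 2 := by split <;> omega
    have : pvParseBin [c] < 2 := by simpa [pvParseBin] using hc
    simp only [List.length_append, List.length_singleton, pow_succ, pow_one]
    nlinarith [ih, this]

theorem pvParseBin_zeros (p : Nat) : pvParseBin (List.replicate p '0') = 0 := by
  induction p with
  | zero => rfl
  | succ n ih =>
    rw [List.replicate_succ', pvParseBin_append]
    simp only [pvParseBin] at ih ⊢
    simp [ih]

theorem pvToBytesBE_length (n v : Nat) : (pvToBytesBE n v).length = n := by
  induction n generalizing v with
  | zero => rfl
  | succ k ih => simp [pvToBytesBE, ih]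

theorem pvToBytesBE_split (k a b : Nat) (ha : a < 256) (hb : b < 256 ^ k) :
    pvToBytesBE (k + 1) (a * 256 ^ k + b) = (a : Int) :: pvToBytesBE k b := by
  induction k generalizing b with
  | zero =>
    interval_cases b
    simp [pvToBytesBE, Nat.mod_eq_of_lt ha, Nat.div_eq_of_lt ha]
  | succ k ih =>
    have hrw : a * 256 ^ (k + 1) + b = 256 * (a * 256 ^ k) + b := by ring
    have h1 : (a * 256 ^ (k + 1) + b) / 256 = a * 256 ^ k + b / 256 := by
      rw [hrw, Nat.mul_add_div (by norm_num)]
    have h2 : (a * 256 ^ (k + 1) + b) % 256 = b % 256 := by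
      rw [hrw, Nat.mul_add_mod]
    have hb' : b / 256 < 256 ^ k := by
      rw [pow_succ] at hb
      omega
    show pvToBytesBE (k + 1) ((a * 256 ^ (k + 1) + b) / 256) ++ _ = _
    rw [h1, h2, ih _ hb']
    simp [pvToBytesBE]

theorem pvLoopA_chunks (k : Nat) (l : List Char) (sections : List Int)
    (hl : l.length = 8 * k) :
    pvLoopA l sections [] = sections ++ pvToBytesBE k (pvParseBin l) := by
  induction k generalizing l sections with
  | zero =>
    have : l = [] := List.eq_nil_of_length_eq_zero (by omega)
    subst this
    simp [pvLoopA, pvToBytesBE]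
  | succ k ih =>
    match l, hl with
    | c1 :: c2 :: c3 :: c4 :: c5 :: c6 :: c7 :: c8 :: rest, hl =>
      have hrest : rest.length = 8 * k := by simp at hl; omega
      have hval : pvParseBin (c1 :: c2 :: c3 :: c4 :: c5 :: c6 :: c7 :: c8 :: rest)
          = pvParseBin [c1, c2, c3, c4, c5, c6, c7, c8] * 256 ^ k
              + pvParseBin rest := by
        rw [show c1 :: c2 :: c3 :: c4 :: c5 :: c6 :: c7 :: c8 :: rest
            = [c1, c2, c3, c4, c5, c6, c7, c8] ++ rest from rfl,
          pvParseBin_append, hrest]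
        norm_num [pow_mul]
      have ha : pvParseBin [c1, c2, c3, c4, c5, c6, c7, c8] < 256 := by
        have := pvParseBin_lt [c1, c2, c3, c4, c5, c6, c7, c8]
        norm_num at this
        exact this
      have hb : pvParseBin rest < 256 ^ k := by
        have := pvParseBin_lt rest
        rwa [hrest, pow_mul] at this
      rw [hval, pvToBytesBE_split k _ _ ha hb]
      simp only [pvLoopA, List.nil_append, List.cons_append, List.length_cons,
        List.length_nil]
      norm_num
      rw [ih rest _ hrest]
      simp

theorem pvFoldAppendZeros (xs : List Int) (ek : List Char) :
    xs.foldl (fun l _ => l ++ ['0']) ek = ek ++ List.replicate xs.length '0' := by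
  induction xs generalizing ek with
  | nil => simp
  | cons x t ih =>
    simp only [List.foldl_cons, List.length_cons, ih]
    simp [List.replicate_succ]

-- ===== VERDICT (by name: the statement is the Claim_ definition above) =====
theorem encode_map_keys_value_pairs_spec : Claim_equal_encode_map_keys_value_pairs := by
  intro dk ek _ _
  unfold Spec_encode_map_keys_value_pairs encode_map_keys_value_pairs encode_map_keys_value_pairs_alt
  simp only [show pvBinVal = pvParseBin from rfl]
  generalize ek.toList = l
  have hm : PySem.Int.mod (8 - PySem.Int.mod (l.length : Int) 8) 8
      = (((8 - l.length % 8) % 8 : Nat) : Int) := by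
    rw [PySem.Int.mod_eq_emod_of_pos (by norm_num), PySem.Int.mod_eq_emod_of_pos (by norm_num)]
    omega
  rw [hm, pvFoldAppendZeros, PySem.List.length_pyRange_one]
  simp only [sub_zero, Int.toNat_natCast]
  set P : Nat := (8 - l.length % 8) % 8 with hP
  set K : Nat := (l.length + P) / 8 with hK
  have hlen : (l ++ List.replicate P '0').length = 8 * K := by
    simp only [List.length_append, List.length_replicate, hK, hP]
    omega
  rw [pvLoopA_chunks K _ _ hlen]
  have hV : pvParseBin (l ++ List.replicate P '0') = pvParseBin l <<< P := by
    rw [pvParseBin_append, pvParseBin_zeros, Nat.shiftLeft_eq]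
    simp
  rw [hV]
  cases l with
  | nil =>
    have hP0 : P = 0 := by simp [hP]
    have hK0 : K = 0 := by simp [hK, hP0]
    simp [hP0, hK0, pvToBytesBE]
  | cons c t =>
    simp only [List.isEmpty_cons, if_neg Bool.false_ne_true]
    have hlen2 : (([((dk.toList.headD ' ').toNat : Int), (P : Int)] : List Int)
        ++ pvToBytesBE K (pvParseBin (c :: t) <<< P)).length = 2 + K := by
      simp [pvToBytesBE_length]
      omega
    rw [hlen2]
    push_cast
    simp
    ring
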